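-- pv_equiv track=rewrite | github.com/zero20121222/WebTester | app/mapping.py | __of_with_in
-- ===== SOURCE A (Python) =====
-- def __of_with_in(sql):
--     exist_in = sql.count("in") > 0
--
--     columns = []
--     if exist_in:
--         in_index = False
--         for tar_v in sql.split(" ")[::-1]:
--             if in_index:
--                 columns.append(tar_v)
--                 in_index = False
--             if tar_v == "in":
--                 in_index = True
--
--     return columns
-- ===== SOURCE B (Python) =====
-- def __of_with_in(sql):
--     tokens = sql.split(" ")
--     return [a for a, b in zip(tokens, tokens[1:]) if b == "in"][::-1]
-- ===== Notes on version B (the rewrite author's own statement) =====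
-- stated objective: idiomatic
-- what changed: Replaced A's reversed-iteration boolean state machine (plus a redundant substring-count guard) by a single pairwise pass: zip the token list with its tail, keep the left token of every pair whose right token equals the keyword, and reverse the result.
import Mathlib
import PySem

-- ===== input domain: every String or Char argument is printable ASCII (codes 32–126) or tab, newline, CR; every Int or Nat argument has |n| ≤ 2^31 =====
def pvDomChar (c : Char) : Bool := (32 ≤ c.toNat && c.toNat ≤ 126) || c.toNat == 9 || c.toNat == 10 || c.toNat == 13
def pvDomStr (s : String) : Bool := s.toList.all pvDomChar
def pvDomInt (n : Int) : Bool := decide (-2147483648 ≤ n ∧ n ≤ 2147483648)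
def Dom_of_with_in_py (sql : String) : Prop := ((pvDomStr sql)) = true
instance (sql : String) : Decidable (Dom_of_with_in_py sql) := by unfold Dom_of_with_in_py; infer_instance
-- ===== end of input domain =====

-- B replaces A's reversed-iteration boolean state machine (and its redundant substring-count guard)
-- by one pairwise zip-filter pass over the token list, reversed at the end (idiomatic; same cost).


-- ===== PORT A =====
-- literal port of __of_with_in: substring-count guard, then a reversed scan with an `in_index` flag
def of_with_in_py (sql : String) : List String :=
  let exist_in : Bool := decide (0 < PySem.Str.count sql "in")
  if exist_in then
    ((((PySem.List.slice? ((PySem.Str.split? sql " ").getD []) none none (-1)).getD []).foldl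
        (fun (st : Bool × List String) tar_v =>
          let columns := if st.1 then st.2 ++ [tar_v] else st.2
          -- in_index := False after an append; then set True iff tar_v == "in"
          (tar_v == "in", columns))
        (false, ([] : List String)))).2
  else []

-- ===== PORT B =====
-- literal port of Source B: zip tokens with tokens[1:], keep lefts of pairs whose right is "in", reverse
def of_with_in_py_alt (sql : String) : List String :=
  let tokens := (PySem.Str.split? sql " ").getD []
  (PySem.List.slice?
      (((tokens.zip (PySem.List.slice tokens (some 1) none)).filter
          (fun p => p.2 == "in")).map (fun p => p.1))
      none none (-1)).getD []

-- ===== PRECONDITION & SPEC =====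
def Spec_of_with_in_py (sql : String) (out : List String) : Prop := out = of_with_in_py_alt sql
instance (sql : String) (out : List String) : Decidable (Spec_of_with_in_py sql out) := by unfold Spec_of_with_in_py; infer_instance

-- ===== CLAIM (what is proved, stated in full; the proofs are below) =====
def Claim_equal_of_with_in_py : Prop := ∀ (sql : String), Dom_of_with_in_py sql → Spec_of_with_in_py sql (of_with_in_py sql)

-- ===== LEMMAS AND PROOFS =====

-- the forward filtered-zip list of B
def pvFwd (ts : List String) : List String :=
  ((ts.zip ts.tail).filter (fun p => p.2 == "in")).map (fun p => p.1)

-- the flag A's scan carries equals "last processed token (= head of remaining forward list) is 'in'"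
def pvFlag (ts : List String) : Bool :=
  match ts with
  | [] => false
  | t :: _ => t == "in"

theorem pvFwd_cons_cons (x y : String) (rs : List String) :
    pvFwd (x :: y :: rs) = (if y == "in" then [x] else []) ++ pvFwd (y :: rs) := by
  by_cases h : y = "in" <;> simp [pvFwd, h]

theorem pv_foldr_char (ts : List String) :
    ts.foldr (fun tar_v (st : Bool × List String) =>
        ((tar_v == "in"), if st.1 then st.2 ++ [tar_v] else st.2)) (false, []) =
      (pvFlag ts, (pvFwd ts).reverse) := by
  induction ts with
  | nil => simp [pvFlag, pvFwd]
  | cons x rest ih =>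
    cases rest with
    | nil => simp [pvFlag, pvFwd]
    | cons y rs =>
      simp only [List.foldr_cons, ih, pvFwd_cons_cons]
      by_cases h : y = "in" <;> simp [pvFlag, h]

theorem pvFwd_eq_nil_of_not_mem (ts : List String) (h : "in" ∉ ts) : pvFwd ts = [] := by
  unfold pvFwd
  rw [List.filter_eq_nil_iff.mpr, List.map_nil]
  intro p hp
  have h2 : p.2 ∈ ts.tail := (List.of_mem_zip hp).2
  have h3 : p.2 ∈ ts := List.mem_of_mem_tail h2
  simp only [beq_iff_eq]
  intro hq; exact h (hq ▸ h3)

-- every piece produced by splitOn.go is already in acc or an infix of (cur.reverse ++ l)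
theorem pv_splitOn_go_mem (sep : List Char) :
    ∀ (fuel : Nat) (l cur : List Char) (acc : List (List Char)) (x : List Char),
      x ∈ PySem.Chars.splitOn.go sep fuel l cur acc → x ∈ acc ∨ x <:+: (cur.reverse ++ l) := by
  intro fuel
  induction fuel with
  | zero =>
    intro l cur acc x hx
    simp only [PySem.Chars.splitOn.go, List.mem_reverse, List.mem_cons] at hx
    rcases hx with h | h
    · exact Or.inr (h ▸ List.infix_refl _)
    · exact Or.inl h
  | succ f ih =>
    intro l cur acc x hx
    cases l with
    | nil =>
      simp only [PySem.Chars.splitOn.go, List.mem_reverse, List.mem_cons] at hx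
      rcases hx with h | h
      · exact Or.inr (h ▸ (List.prefix_append _ _).isInfix)
      · exact Or.inl h
    | cons c rest =>
      simp only [PySem.Chars.splitOn.go] at hx
      split at hx
      · rcases ih _ _ _ _ hx with h | h
        · rcases List.mem_cons.mp h with h' | h'
          · exact Or.inr (h' ▸ (List.prefix_append _ _).isInfix)
          · exact Or.inl h'
        · refine Or.inr (h.trans ?_)
          simp only [List.reverse_nil, List.nil_append]
          exact ((List.drop_suffix _ _).isInfix).trans (List.suffix_append _ _).isInfix
      · rcases ih _ _ _ _ hx with h | h
        · exact Or.inl h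
        · refine Or.inr ?_
          simpa using h

theorem pv_infix_of_mem_splitOn (s sep cs : List Char)
    (h : cs ∈ PySem.Chars.splitOn s sep) : cs <:+: s := by
  unfold PySem.Chars.splitOn at h
  rcases pv_splitOn_go_mem sep _ s [] [] cs h with h' | h'
  · simp at h'
  · simpa using h'

theorem pv_count_go_ge (sub : List Char) :
    ∀ (fuel : Nat) (l : List Char) (acc : Nat), acc ≤ PySem.Chars.count.go sub fuel l acc := by
  intro fuel
  induction fuel with
  | zero => intro l acc; simp [PySem.Chars.count.go]
  | succ f ih =>
    intro l acc
    cases l with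
    | nil => simp [PySem.Chars.count.go]
    | cons c rest =>
      simp only [PySem.Chars.count.go]
      split
      · exact le_trans (Nat.le_succ acc) (ih _ _)
      · exact ih _ _

theorem pv_count_go_pos (sub : List Char) (hsub : sub ≠ []) :
    ∀ (fuel : Nat) (l : List Char) (acc : Nat), l.length ≤ fuel → sub <:+: l →
      acc < PySem.Chars.count.go sub fuel l acc := by
  intro fuel
  induction fuel with
  | zero =>
    intro l acc hlen hinf
    have : l = [] := List.eq_nil_of_length_eq_zero (Nat.le_zero.mp hlen)
    subst this
    exact absurd (List.eq_nil_of_infix_nil hinf) hsub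
  | succ f ih =>
    intro l acc hlen hinf
    cases l with
    | nil => exact absurd (List.eq_nil_of_infix_nil hinf) hsub
    | cons c rest =>
      simp only [PySem.Chars.count.go]
      split
      · exact lt_of_lt_of_le (Nat.lt_succ_self acc) (pv_count_go_ge sub _ _ _)
      · rename_i hnp
        have hinf' : sub <:+: rest := by
          rcases hinf with ⟨pre, suf, he⟩
          cases pre with
          | nil =>
            exfalso
            apply hnp
            exact List.isPrefixOf_iff_prefix.mpr ⟨suf, by simpa using he⟩
          | cons p ps =>
            exact ⟨ps, suf, by simpa using congrArg List.tail he⟩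
        exact ih rest acc (by simpa using Nat.lt_succ_iff.mp (Nat.lt_of_lt_of_le (by simp) hlen)) hinf'

theorem pv_count_pos_of_infix (s sub : List Char) (hsub : sub ≠ []) (hinf : sub <:+: s) :
    0 < PySem.Chars.count s sub := by
  unfold PySem.Chars.count
  rw [if_neg (by simpa [List.isEmpty_iff] using hsub)]
  exact pv_count_go_pos sub hsub s.length s 0 (le_refl _) hinf

-- the tokens of sql.split(" ") as char lists
theorem pv_tokens_eq (sql : String) :
    (PySem.Str.split? sql " ").getD [] =
      (PySem.Chars.splitOn sql.toList [' ']).map String.ofList := by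
  simp [PySem.Str.split?, PySem.Chars.split?]

theorem pv_not_mem_tokens (sql : String) (h : ¬ 0 < PySem.Str.count sql "in") :
    "in" ∉ (PySem.Str.split? sql " ").getD [] := by
  rw [pv_tokens_eq]
  intro hmem
  rcases List.mem_map.mp hmem with ⟨cs, hcs, hofs⟩
  have hcs' : cs = ['i', 'n'] := by
    have := congrArg String.toList hofs
    simpa [String.toList_ofList] using this
  subst hcs'
  have hinf := pv_infix_of_mem_splitOn _ _ _ hcs
  exact h (pv_count_pos_of_infix sql.toList ['i', 'n'] (by simp) hinf)

-- ===== VERDICT (by name: the statement is the Claim_ definition above) =====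
theorem pv_slice_one {α : Type} (xs : List α) : PySem.List.slice xs (some 1) none = xs.tail := by
  rw [PySem.List.slice_from xs (by norm_num)]; simp

theorem of_with_in_py_spec : Claim_equal_of_with_in_py := by
  intro sql _
  unfold Spec_of_with_in_py of_with_in_py of_with_in_py_alt
  simp only [PySem.List.slice?_none_none_neg_one, Option.getD_some, pv_slice_one]
  by_cases h : 0 < PySem.Str.count sql "in"
  · rw [if_pos (by simpa using h)]
    rw [List.foldl_reverse]
    rw [pv_foldr_char]
    rfl
  · rw [if_neg (by simpa using h)]
    have h0 := pvFwd_eq_nil_of_not_mem _ (pv_not_mem_tokens sql h)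
    unfold pvFwd at h0
    rw [h0]
    rfl
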